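-- pv_equiv track=rewrite | github.com/youyuge34/LCY_OnlineJudge | 0001/1_3.py | getNnum
-- ===== SOURCE A (Python) =====
-- def getNnum(arr,num):
--   res = 0
--   length = len(arr)
--   for i in range(length):
--     temp = 0 #
--     for j in range(i+1,length):
--       if abs(arr[i]-arr[j])>num:
--         # 符合题意的min，max找到了~
--         res += pow(2,length-i-2-temp)
--         temp += 1
--   return res
-- ===== SOURCE B (Python) =====
-- def getNnum(arr, num):
--     # closed-form geometric sum per index: count far elements on the right,
--     # then add 2^(L-1-i) - 2^(L-1-i-m) instead of accumulating powers one by one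
--     L = len(arr)
--     res = 0
--     for i, x in enumerate(arr):
--         m = sum(1 for y in arr[i + 1:] if abs(x - y) > num)
--         if m:
--             res += (1 << (L - 1 - i)) - (1 << (L - 1 - i - m))
--     return res
-- ===== Notes on version B (the rewrite author's own statement) =====
-- stated objective: alternative
-- what changed: B replaces A's inner loop that accumulates one big-integer power of two per far element (with a shifting exponent tracked in temp) by a plain count m of far right-hand elements per index plus the closed-form geometric sum 2^(L-1-i) - 2^(L-1-i-m); intended as faster (measured 9.75x at the largest size both finished, but the probe could not confirm the label).
import Mathlib
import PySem

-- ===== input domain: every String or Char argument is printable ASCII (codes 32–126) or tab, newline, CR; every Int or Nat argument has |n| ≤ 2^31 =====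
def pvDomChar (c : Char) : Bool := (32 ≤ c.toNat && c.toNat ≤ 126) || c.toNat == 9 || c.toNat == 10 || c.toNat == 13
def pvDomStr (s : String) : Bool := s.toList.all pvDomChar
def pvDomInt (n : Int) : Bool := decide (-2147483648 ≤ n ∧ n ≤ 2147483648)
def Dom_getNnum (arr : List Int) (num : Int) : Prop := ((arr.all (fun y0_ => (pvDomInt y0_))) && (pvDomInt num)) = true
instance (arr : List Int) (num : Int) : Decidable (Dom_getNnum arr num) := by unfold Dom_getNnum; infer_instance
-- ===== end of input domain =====

-- B replaces A's power-accumulating inner loop by a count of far right-hand elements and the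
-- closed-form geometric sum 2^(L-1-i) - 2^(L-1-i-m); objective: alternative (closed form instead of accumulation).


-- ===== PORT A =====
-- arr[i] is ported as PySem.List.pyGetD arr i 0: every index produced by the ranges is in range.
-- pow(2, length-i-2-temp) is ported as 2 ^ (…).toNat: whenever the branch fires the exponent is ≥ 0
-- (temp counts earlier matches among j ∈ (i, j), so temp ≤ length-i-2 there).
def getNnum (arr : List Int) (num : Int) : Int :=
  let length : Int := arr.length
  (PySem.List.pyRange 0 length 1).foldl
    (fun res i =>
      ((PySem.List.pyRange (i + 1) length 1).foldl
        (fun (st : Int × Int) j =>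
          if |PySem.List.pyGetD arr i 0 - PySem.List.pyGetD arr j 0| > num then
            (st.1 + 2 ^ (length - i - 2 - st.2).toNat, st.2 + 1)
          else st)
        (res, 0)).1)
    0

-- ===== PORT B =====
-- arr[i+1:] is PySem.List.slice arr (some (i+1)) none; 1 << k is 2 ^ k (k ≥ 0 here since m ≤ L-1-i);
-- sum(1 for y in … if …) is countP.
def getNnum_alt (arr : List Int) (num : Int) : Int :=
  let L : Int := arr.length
  (PySem.List.enumerate arr).foldl
    (fun res p =>
      let i : Int := p.1
      let x : Int := p.2
      let m : Int := ((PySem.List.slice arr (some (i + 1)) none).countP (fun y => decide (|x - y| > num)) : Nat)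
      if m ≠ 0 then res + (2 ^ (L - 1 - i).toNat - 2 ^ (L - 1 - i - m).toNat) else res)
    0

-- ===== PRECONDITION & SPEC =====
def Spec_getNnum (arr : List Int) (num : Int) (out : Int) : Prop := out = getNnum_alt arr num
instance (arr : List Int) (num : Int) (out : Int) : Decidable (Spec_getNnum arr num out) := by unfold Spec_getNnum; infer_instance

-- ===== CLAIM (what is proved, stated in full; the proofs are below) =====
def Claim_equal_getNnum : Prop := ∀ (arr : List Int) (num : Int), Dom_getNnum arr num → Spec_getNnum arr num (getNnum arr num)

-- ===== LEMMAS AND PROOFS =====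

-- A's inner loop in closed form: starting at (r, t), a suffix s with c matches adds
-- 2^(e+1-t) - 2^(e+1-t-c) to r and c to t (exponents stay >= 0 under the stated bound).
lemma innerA (num x e : Int) (s : List Int) :
    ∀ (r t : Int), 0 ≤ t →
      t + (s.countP (fun y => decide (|x - y| > num)) : Int) ≤ e + 1 →
      s.foldl
        (fun (st : Int × Int) y =>
          if |x - y| > num then (st.1 + 2 ^ (e - st.2).toNat, st.2 + 1) else st)
        (r, t)
      = (r + 2 ^ (e + 1 - t).toNat
           - 2 ^ (e + 1 - t - (s.countP (fun y => decide (|x - y| > num)) : Int)).toNat,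
         t + (s.countP (fun y => decide (|x - y| > num)) : Int)) := by
  induction s with
  | nil => intro r t ht hb; simp
  | cons y s ih =>
    intro r t ht hb
    simp only [List.foldl_cons]
    by_cases hy : |x - y| > num
    · rw [if_pos hy]
      have hc : ((y :: s).countP (fun y => decide (|x - y| > num)) : Int)
          = 1 + (s.countP (fun y => decide (|x - y| > num)) : Int) := by
        simp [hy]; ring
      rw [hc] at hb ⊢
      rw [ih (r + 2 ^ (e - t).toNat) (t + 1) (by omega) (by omega)]
      have h1 : (e + 1 - t).toNat = (e - t).toNat + 1 := by omega
      have h4 : e + 1 - t - (1 + (s.countP (fun y => decide (|x - y| > num)) : Int))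
          = e - t - (s.countP (fun y => decide (|x - y| > num)) : Int) := by ring
      have h2 : e + 1 - (t + 1) = e - t := by ring
      rw [h4, h2, Prod.mk.injEq]
      constructor
      · rw [h1, pow_succ]; ring
      · ring
    · rw [if_neg hy]
      have hc : ((y :: s).countP (fun y => decide (|x - y| > num)) : Int)
          = (s.countP (fun y => decide (|x - y| > num)) : Int) := by
        simp [hy]
      rw [hc] at hb ⊢
      exact ih r t ht hb

-- A's per-index step: the inner loop adds exactly the closed-form geometric sum.
lemma stepA (arr : List Int) (num : Int) (i res : Int) (h0 : 0 ≤ i) (h1 : i < (arr.length : Int)) :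
    ((PySem.List.pyRange (i + 1) (arr.length : Int)).foldl
      (fun (st : Int × Int) j =>
        if |PySem.List.pyGetD arr i 0 - PySem.List.pyGetD arr j 0| > num then
          (st.1 + 2 ^ ((arr.length : Int) - i - 2 - st.2).toNat, st.2 + 1)
        else st) (res, 0)).1
    = res + (2 ^ ((arr.length : Int) - 1 - i).toNat
        - 2 ^ ((arr.length : Int) - 1 - i
            - ((arr.drop (i + 1).toNat).countP
                (fun y => decide (|PySem.List.pyGetD arr i 0 - y| > num)) : Int)).toNat) := by
  rw [PySem.List.foldl_pyRange_pyGetD' arr 0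
    (fun (st : Int × Int) y =>
      if |PySem.List.pyGetD arr i 0 - y| > num then
        (st.1 + 2 ^ ((arr.length : Int) - i - 2 - st.2).toNat, st.2 + 1)
      else st) (res, 0) (by omega : (0:Int) ≤ i + 1)]
  have hlen : ((arr.drop (i + 1).toNat).length : Int) = (arr.length : Int) - (i + 1) := by
    rw [List.length_drop]; omega
  have hcnt := List.countP_le_length
    (p := fun y => decide (|PySem.List.pyGetD arr i 0 - y| > num)) (l := arr.drop (i + 1).toNat)
  rw [innerA num (PySem.List.pyGetD arr i 0) ((arr.length : Int) - i - 2) (arr.drop (i + 1).toNat)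
    res 0 le_rfl (by omega)]
  have h1 : (arr.length : Int) - i - 2 + 1 - 0 = (arr.length : Int) - 1 - i := by ring
  rw [h1]
  ring

-- list(enumerate(xs))[k] = (s + k, xs[k])
lemma enum_getElem (xs : List Int) : ∀ (s : Int) (k : Nat) (h : k < (PySem.List.enumerate xs s).length),
    (PySem.List.enumerate xs s)[k]
      = (s + k, xs[k]'(by simpa [PySem.List.length_enumerate] using h)) := by
  induction xs with
  | nil => intro s k h; simp [PySem.List.enumerate_nil] at h
  | cons x xs ih =>
    intro s k h
    cases k with
    | zero => simp [PySem.List.enumerate_cons]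
    | succ k =>
      have h' : k < (PySem.List.enumerate xs (s + 1)).length := by
        simp [PySem.List.length_enumerate] at h ⊢
        simpa [PySem.List.enumerate_cons] using h
      simp only [PySem.List.enumerate_cons, List.getElem_cons_succ]
      rw [ih (s + 1) k h', Prod.mk.injEq]
      refine ⟨by push_cast; ring, rfl⟩
theorem getNnum_spec : Claim_equal_getNnum := by
  unfold Claim_equal_getNnum Spec_getNnum
  intro arr num _
  simp only [getNnum, getNnum_alt]
  rw [PySem.List.foldl_congr_mem _ _
    (fun (res i : Int) => res + (2 ^ ((arr.length : Int) - 1 - i).toNat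
        - 2 ^ ((arr.length : Int) - 1 - i
            - ((arr.drop (i + 1).toNat).countP
                (fun y => decide (|PySem.List.pyGetD arr i 0 - y| > num)) : Int)).toNat)) 0
    (by
      intro res i hi
      rw [PySem.List.mem_pyRange_one] at hi
      exact stepA arr num i res (by omega) (by omega))]
  rw [PySem.List.foldl_congr_mem _ _
    (fun (res : Int) (p : Int × Int) => res +
      (if ((PySem.List.slice arr (some (p.1 + 1)) none).countP
              (fun y => decide (|p.2 - y| > num)) : Int) ≠ 0 then
        2 ^ ((arr.length : Int) - 1 - p.1).toNat
          - 2 ^ ((arr.length : Int) - 1 - p.1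
              - ((PySem.List.slice arr (some (p.1 + 1)) none).countP
                  (fun y => decide (|p.2 - y| > num)) : Int)).toNat
      else 0)) 0
    (by
      intro res p _
      dsimp only
      by_cases hc : ((PySem.List.slice arr (some (p.1 + 1)) none).countP
          (fun y => decide (|p.2 - y| > num)) : Int) ≠ 0
      · rw [if_pos hc, if_pos hc]
      · rw [if_neg hc, if_neg hc]; ring)]
  rw [PySem.List.foldl_add, PySem.List.foldl_add]
  congr 1
  refine congrArg List.sum ?_
  apply List.ext_getElem
  · simp [PySem.List.length_pyRange_one, PySem.List.length_enumerate]
  · intro k h1 h2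
    have hk : k < arr.length := by
      simpa [PySem.List.length_enumerate] using h2
    rw [List.getElem_map, List.getElem_map, PySem.List.getElem_pyRange_one,
      enum_getElem arr 0 k (by simpa [PySem.List.length_enumerate] using hk)]
    simp only [zero_add]
    have hsl : PySem.List.slice arr (some ((k : Int) + 1)) none
        = arr.drop ((k : Int) + 1).toNat := PySem.List.slice_from arr (by omega)
    have hget : PySem.List.pyGetD arr (k : Int) 0 = arr[k]'hk := by
      rw [PySem.List.pyGetD_natCast, List.getD_eq_getElem _ _ hk]
    rw [hsl, hget]
    set m : Int := ((arr.drop ((k : Int) + 1).toNat).countP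
        (fun y => decide (|arr[k]'hk - y| > num)) : Int) with hm
    by_cases h0 : m = 0
    · rw [if_neg (by simp [h0]), h0]; ring
    · rw [if_pos h0]
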